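-- pv_equiv track=rewrite | github.com/Rafael-Tinelli/comparador-consorcios-data | transform/build_read_models.py | build_ranking_lookup
-- ===== SOURCE A (Python) =====
-- from typing import Any, Dict, Iterable, List, Optional, Tuple
--
-- def build_ranking_lookup(rankings: List[Dict[str, Any]]) -> Dict[str, Dict[str, Any]]:
--     lookup = {}
--
--     for row in rankings:
--         cnpj = row.get("cnpj_root") or row.get("cnpj")
--         if cnpj:
--             lookup[f"cnpj:{cnpj}"] = row
--
--         key = row.get("normalized_name")
--         if key and f"name:{key}" not in lookup:
--             lookup[f"name:{key}"] = row
--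
--     return lookup
-- ===== SOURCE B (Python) =====
-- def _row_events(row):
--     events = []
--     c = row.get("cnpj_root") or row.get("cnpj")
--     if c:
--         events.append((f"cnpj:{c}", row, True))
--     n = row.get("normalized_name")
--     if n:
--         events.append((f"name:{n}", row, False))
--     return events
--
--
-- def build_ranking_lookup(rankings):
--     events = []
--     for row in rankings:
--         events += _row_events(row)
--     first = {}
--     last = {}
--     for key, row, is_cnpj in events:
--         first.setdefault(key, (row, is_cnpj))
--         last[key] = row
--     return {key: (last[key] if is_cnpj else row) for key, (row, is_cnpj) in first.items()}
-- ===== Notes on version B (the rewrite author's own statement) =====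
-- stated objective: alternative
-- what changed: A threads one dict through a single stateful loop (overwrite for cnpj keys, insert-if-absent for name keys); B instead flattens the rows into a flat (key, row, kind) event stream, records the first and last occurrence per key in one grouping pass, and builds the result dict from the first-occurrence order, taking the last row for cnpj keys and the first row for name keys.
import Mathlib
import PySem

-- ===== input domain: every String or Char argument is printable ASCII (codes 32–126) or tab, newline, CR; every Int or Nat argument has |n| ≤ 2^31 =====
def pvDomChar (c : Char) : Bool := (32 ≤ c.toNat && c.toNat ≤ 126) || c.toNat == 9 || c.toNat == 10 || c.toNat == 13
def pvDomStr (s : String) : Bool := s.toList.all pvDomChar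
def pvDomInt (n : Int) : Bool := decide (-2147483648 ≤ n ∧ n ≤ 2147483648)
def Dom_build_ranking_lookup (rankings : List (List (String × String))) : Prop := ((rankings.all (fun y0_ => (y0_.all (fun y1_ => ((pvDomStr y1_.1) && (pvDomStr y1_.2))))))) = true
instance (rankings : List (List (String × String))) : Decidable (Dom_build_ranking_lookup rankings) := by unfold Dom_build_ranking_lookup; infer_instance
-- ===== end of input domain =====

-- B replaces A's single stateful dict loop by a flat (key, row, kind) event stream grouped in one
-- pass (first/last occurrence per key); objective: alternative decomposition, same asymptotic cost.

-- ===== PORT A =====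
-- row.get(k): first-match lookup in the association list (Python dict keys are unique)
def pvRowGet (row : List (String × String)) (k : String) : Option String :=
  (row.find? (fun p => p.1 == k)).map (fun p => p.2)

-- Python `a or b` on two Optional[str] values (None and "" are falsy)
def pvOr (a b : Option String) : Option String :=
  match a with
  | some s => if s = "" then b else some s
  | none => b

-- the body of A's `for row in rankings` loop
def pvRowStepA (lookup : PySem.Dict String (List (String × String)))
    (row : List (String × String)) : PySem.Dict String (List (String × String)) :=
  let lookup1 :=
    match pvOr (pvRowGet row "cnpj_root") (pvRowGet row "cnpj") with
    | some c => if c = "" then lookup else lookup.insert ("cnpj:" ++ c) row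
    | none => lookup
  match pvRowGet row "normalized_name" with
  | some k =>
      if k = "" then lookup1
      else if lookup1.contains ("name:" ++ k) then lookup1
      else lookup1.insert ("name:" ++ k) row
  | none => lookup1

def build_ranking_lookup (rankings : List (List (String × String))) : List (String × List (String × String)) :=
  (rankings.foldl pvRowStepA PySem.Dict.empty).items

-- ===== PORT B =====
-- _row_events(row) from Source B
def pvRowEvents (row : List (String × String)) : List (String × List (String × String) × Bool) :=
  let events : List (String × List (String × String) × Bool) := []
  let events :=
    match pvOr (pvRowGet row "cnpj_root") (pvRowGet row "cnpj") with
    | some c => if c = "" then events else events ++ [("cnpj:" ++ c, row, true)]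
    | none => events
  match pvRowGet row "normalized_name" with
  | some n => if n = "" then events else events ++ [("name:" ++ n, row, false)]
  | none => events

def build_ranking_lookup_alt (rankings : List (List (String × String))) : List (String × List (String × String)) :=
  let events := rankings.foldl (fun es row => es ++ pvRowEvents row) []
  let fl := events.foldl
    (fun (p : PySem.Dict String (List (String × String) × Bool) × PySem.Dict String (List (String × String))) e =>
      (p.1.setdefault e.1 (e.2.1, e.2.2), p.2.insert e.1 e.2.1))
    (PySem.Dict.empty, PySem.Dict.empty)
  -- final dict comprehension; `last[key]` never misses (every key of `first` is in `last`),
  -- so the `.getD` default is never used — exact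
  (PySem.Dict.ofList (fl.1.items.map (fun q =>
    (q.1, if q.2.2 then ((fl.2.get? q.1).getD q.2.1) else q.2.1)))).items

-- ===== PRECONDITION & SPEC =====
def Spec_build_ranking_lookup (rankings : List (List (String × String))) (out : List (String × List (String × String))) : Prop := out = build_ranking_lookup_alt rankings
instance (rankings : List (List (String × String))) (out : List (String × List (String × String))) : Decidable (Spec_build_ranking_lookup rankings out) := by unfold Spec_build_ranking_lookup; infer_instance

-- ===== CLAIM (what is proved, stated in full; the proofs are below) =====
def Claim_equal_build_ranking_lookup : Prop := ∀ (rankings : List (List (String × String))), Dom_build_ranking_lookup rankings → Spec_build_ranking_lookup rankings (build_ranking_lookup rankings)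

-- ===== LEMMAS AND PROOFS =====

-- A's dict update for one event
def pvStep (d : PySem.Dict String (List (String × String)))
    (e : String × List (String × String) × Bool) : PySem.Dict String (List (String × String)) :=
  if e.2.2 then d.insert e.1 e.2.1
  else if d.contains e.1 then d else d.insert e.1 e.2.1

-- B's two accumulators for one event
def pvFirstStep (f : PySem.Dict String (List (String × String) × Bool))
    (e : String × List (String × String) × Bool) : PySem.Dict String (List (String × String) × Bool) :=
  f.setdefault e.1 (e.2.1, e.2.2)

def pvLastStep (l : PySem.Dict String (List (String × String)))
    (e : String × List (String × String) × Bool) : PySem.Dict String (List (String × String)) :=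
  l.insert e.1 e.2.1

-- the value the final dict comprehension assigns to one entry of `first`
def pvVal (l : PySem.Dict String (List (String × String)))
    (q : String × List (String × String) × Bool) : String × List (String × String) :=
  (q.1, if q.2.2 then ((l.get? q.1).getD q.2.1) else q.2.1)

-- every event's kind bool is readable off its key's first character ('cnpj:…' vs 'name:…')
def pvKind (e : String × List (String × String) × Bool) : Prop :=
  e.1.toList.head? = some (if e.2.2 then 'c' else 'n')

theorem pvKind_rowEvents (row : List (String × String)) :
    ∀ e ∈ pvRowEvents row, pvKind e := by
  intro e he
  unfold pvRowEvents at he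
  rcases h1 : pvOr (pvRowGet row "cnpj_root") (pvRowGet row "cnpj") with _ | c <;>
    rcases h2 : pvRowGet row "normalized_name" with _ | n <;>
    simp only [h1, h2] at he <;> (try split_ifs at he) <;>
    simp only [List.mem_append, List.mem_singleton, List.not_mem_nil, false_or] at he <;>
    first
    | exact he.elim
    | (subst he; simp [pvKind, String.toList_append])
    | (rcases he with he | he <;> subst he <;> simp [pvKind, String.toList_append])

theorem pvRowStepA_eq_foldl (lookup : PySem.Dict String (List (String × String)))
    (row : List (String × String)) :
    pvRowStepA lookup row = (pvRowEvents row).foldl pvStep lookup := by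
  unfold pvRowStepA pvRowEvents
  rcases h1 : pvOr (pvRowGet row "cnpj_root") (pvRowGet row "cnpj") with _ | c <;>
    rcases h2 : pvRowGet row "normalized_name" with _ | n <;>
    simp only [] <;> (try split_ifs) <;> simp [pvStep, List.foldl, *]

-- loop invariant: A's dict after an event stream = B's `first` entries valued through `last`

theorem pvMain (es : List (String × List (String × String) × Bool))
    (hk : ∀ e ∈ es, pvKind e) :
    ((es.foldl pvStep PySem.Dict.empty).items
        = (es.foldl pvFirstStep PySem.Dict.empty).items.map (pvVal (es.foldl pvLastStep PySem.Dict.empty)))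
      ∧ (es.foldl pvFirstStep PySem.Dict.empty).keys.Nodup
      ∧ (∀ q ∈ (es.foldl pvFirstStep PySem.Dict.empty).items, (q.1, q.2.1, q.2.2) ∈ es) := by
  induction es using List.reverseRecOn with
  | nil =>
    exact ⟨rfl, by simp only [List.foldl_nil]; exact PySem.Dict.nodup_keys_empty,
      by simp [List.foldl, PySem.Dict.empty]⟩
  | append_singleton es e ih =>
    have hk' : ∀ x ∈ es, pvKind x := fun x hx => hk x (List.mem_append_left _ hx)
    have hke : pvKind e := hk e (List.mem_append_right _ (List.mem_singleton.mpr rfl))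
    obtain ⟨h1, h2, h3⟩ := ih hk'
    set d := es.foldl pvStep PySem.Dict.empty with hd
    set f := es.foldl pvFirstStep PySem.Dict.empty with hf
    set l := es.foldl pvLastStep PySem.Dict.empty with hl
    obtain ⟨k, row, b⟩ := e
    -- keys agree
    have hkeys : d.keys = f.keys := by
      show d.items.map Prod.fst = f.items.map Prod.fst
      rw [h1, List.map_map]; rfl
    have hcont : d.contains k = f.contains k := by
      rw [PySem.Dict.contains_eq_decide_mem_keys, PySem.Dict.contains_eq_decide_mem_keys, hkeys]
    -- an item of f with key k has the same kind bool as the event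
    have hkind : ∀ q ∈ f.items, q.1 = k → q.2.2 = b := by
      intro q hq hqk
      have hq1 : pvKind (q.1, q.2.1, q.2.2) := hk' _ (h3 q hq)
      simp only [pvKind] at hq1 hke
      rw [hqk] at hq1
      rw [hq1] at hke
      by_contra hne
      rcases Bool.eq_false_or_eq_true q.2.2 with h | h <;>
        rcases Bool.eq_false_or_eq_true b with h' | h' <;>
        simp [h, h'] at hke hne
    simp only [List.foldl_append, List.foldl_cons, List.foldl_nil, ← hd, ← hf, ← hl]
    refine ⟨?_, ?_, ?_⟩
    · -- items equality
      cases hfc : f.contains k with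
      | false =>
        have hdc : d.contains k = false := by rw [hcont, hfc]
        have hkmem : k ∉ f.keys := by
          have := PySem.Dict.contains_eq_decide_mem_keys f k; rw [hfc] at this
          exact of_decide_eq_false this.symm
        have hfresh : ∀ q ∈ f.items, q.1 ≠ k := fun q hq h =>
          hkmem (h ▸ PySem.Dict.mem_keys_of_mem_items f hq)
        have hmapeq : ∀ q ∈ f.items, pvVal (pvLastStep l (k, row, b)) q = pvVal l q := by
          intro q hq
          simp only [pvVal, pvLastStep, PySem.Dict.get?_insert]
          rw [if_neg (hfresh q hq)]
        cases b with
        | true =>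
          rw [show pvStep d (k, row, true) = d.insert k row from rfl,
            show pvFirstStep f (k, row, true) = f.setdefault k (row, true) from rfl,
            PySem.Dict.setdefault_of_not_contains f _ hfc,
            PySem.Dict.items_insert_of_not_contains d row hdc,
            PySem.Dict.items_insert_of_not_contains f (row, true) hfc,
            List.map_append, h1]
          refine congrArg₂ _ (List.map_congr_left hmapeq).symm ?_
          simp [pvVal, pvLastStep]
        | false =>
          rw [show pvStep d (k, row, false) = if d.contains k then d else d.insert k row from rfl,
            show pvFirstStep f (k, row, false) = f.setdefault k (row, false) from rfl,
            PySem.Dict.setdefault_of_not_contains f _ hfc, hdc]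
          simp only [Bool.false_eq_true, if_false]
          rw [PySem.Dict.items_insert_of_not_contains d row hdc,
            PySem.Dict.items_insert_of_not_contains f (row, false) hfc,
            List.map_append, h1]
          refine congrArg₂ _ (List.map_congr_left hmapeq).symm ?_
          simp [pvVal, pvLastStep]
      | true =>
        have hdc : d.contains k = true := by rw [hcont, hfc]
        cases b with
        | true =>
          rw [show pvStep d (k, row, true) = d.insert k row from rfl,
            show pvFirstStep f (k, row, true) = f.setdefault k (row, true) from rfl,
            PySem.Dict.setdefault_of_contains f _ hfc,
            PySem.Dict.items_insert_of_contains d row hdc, h1, List.map_map]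
          refine List.map_congr_left ?_
          intro q hq
          simp only [Function.comp_apply, pvVal, pvLastStep, PySem.Dict.get?_insert]
          by_cases hqk : q.1 = k
          · have hb := hkind q hq hqk
            simp [hqk, hb]
          · simp [hqk]
        | false =>
          rw [show pvStep d (k, row, false) = if d.contains k then d else d.insert k row from rfl,
            show pvFirstStep f (k, row, false) = f.setdefault k (row, false) from rfl,
            PySem.Dict.setdefault_of_contains f _ hfc, hdc]
          simp only [if_true, h1]
          refine List.map_congr_left ?_
          intro q hq
          simp only [pvVal, pvLastStep, PySem.Dict.get?_insert]
          by_cases hqk : q.1 = k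
          · have hb := hkind q hq hqk
            simp [hqk, hb]
          · simp [hqk]
    · -- Nodup keys
      cases hfc : f.contains k with
      | true => rw [show pvFirstStep f (k, row, b) = f.setdefault k (row, b) from rfl,
          PySem.Dict.setdefault_of_contains f _ hfc]; exact h2
      | false =>
        rw [show pvFirstStep f (k, row, b) = f.setdefault k (row, b) from rfl,
          PySem.Dict.setdefault_of_not_contains f _ hfc,
          PySem.Dict.keys_insert_of_not_contains f _ hfc]
        have hkmem : k ∉ f.keys := by
          have := PySem.Dict.contains_eq_decide_mem_keys f k; rw [hfc] at this
          exact of_decide_eq_false this.symm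
        simp only [List.nodup_append, List.nodup_singleton, true_and]
        refine ⟨h2, ?_⟩
        intro a ha bb hbb
        rw [List.mem_singleton] at hbb
        subst hbb
        exact fun h => hkmem (h ▸ ha)
    · -- provenance
      intro q hq
      cases hfc : f.contains k with
      | true =>
        rw [show pvFirstStep f (k, row, b) = f.setdefault k (row, b) from rfl,
          PySem.Dict.setdefault_of_contains f _ hfc] at hq
        exact List.mem_append_left _ (h3 q hq)
      | false =>
        rw [show pvFirstStep f (k, row, b) = f.setdefault k (row, b) from rfl,
          PySem.Dict.setdefault_of_not_contains f _ hfc,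
          PySem.Dict.items_insert_of_not_contains f _ hfc] at hq
        rcases List.mem_append.mp hq with h | h
        · exact List.mem_append_left _ (h3 q h)
        · simp only [List.mem_singleton] at h
          subst h
          exact List.mem_append_right _ (by simp)

theorem pvFoldPair (es : List (String × List (String × String) × Bool))
    (f0 : PySem.Dict String (List (String × String) × Bool))
    (l0 : PySem.Dict String (List (String × String))) :
    es.foldl
      (fun (p : PySem.Dict String (List (String × String) × Bool) × PySem.Dict String (List (String × String))) e =>
        (p.1.setdefault e.1 (e.2.1, e.2.2), p.2.insert e.1 e.2.1)) (f0, l0)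
      = (es.foldl pvFirstStep f0, es.foldl pvLastStep l0) := by
  induction es generalizing f0 l0 with
  | nil => rfl
  | cons e es ih => simpa [List.foldl, pvFirstStep, pvLastStep] using ih _ _

theorem pvOfList_items (L : List (String × List (String × String)))
    (h : (L.map Prod.fst).Nodup) : (PySem.Dict.ofList L).items = L := by
  have h0 : ∀ a ∈ L, (PySem.Dict.empty : PySem.Dict String (List (String × String))).contains a.1 = false :=
    fun a _ => PySem.Dict.contains_empty a.1
  have := PySem.Dict.items_foldl_insert_fresh L Prod.fst Prod.snd PySem.Dict.empty h0 h
  simpa [PySem.Dict.empty, PySem.Dict.items] using this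

theorem pvKind_flatMap (rankings : List (List (String × String))) :
    ∀ e ∈ rankings.flatMap pvRowEvents, pvKind e := by
  intro e he
  rw [List.mem_flatMap] at he
  obtain ⟨row, _, h⟩ := he
  exact pvKind_rowEvents row e h

theorem pvFinal (rankings : List (List (String × String))) :
    build_ranking_lookup rankings = build_ranking_lookup_alt rankings := by
  unfold build_ranking_lookup build_ranking_lookup_alt
  have hev : rankings.foldl (fun es row => es ++ pvRowEvents row)
      ([] : List (String × List (String × String) × Bool)) = rankings.flatMap pvRowEvents := by
    simpa using PySem.List.foldl_append_eq_flatMap pvRowEvents rankings []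
  set es := rankings.flatMap pvRowEvents with hes
  obtain ⟨h1, h2, h3⟩ := pvMain es (pvKind_flatMap rankings)
  have hA : rankings.foldl pvRowStepA PySem.Dict.empty = es.foldl pvStep PySem.Dict.empty := by
    rw [hes, List.foldl_flatMap]
    have hfe : pvRowStepA = fun a x => (pvRowEvents x).foldl pvStep a :=
      funext fun a => funext fun x => pvRowStepA_eq_foldl a x
    rw [hfe]
  simp only [hev, pvFoldPair]
  rw [hA]
  have hnd : ((( es.foldl pvFirstStep PySem.Dict.empty).items.map
      (pvVal (es.foldl pvLastStep PySem.Dict.empty))).map Prod.fst).Nodup := by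
    have : ((es.foldl pvFirstStep PySem.Dict.empty).items.map
        (pvVal (es.foldl pvLastStep PySem.Dict.empty))).map Prod.fst
        = (es.foldl pvFirstStep PySem.Dict.empty).keys := by
      rw [List.map_map]; rfl
    rw [this]; exact h2
  rw [show (fun (q : String × List (String × String) × Bool) =>
        (q.1, if q.2.2 then (((es.foldl pvLastStep PySem.Dict.empty).get? q.1).getD q.2.1) else q.2.1))
      = pvVal (es.foldl pvLastStep PySem.Dict.empty) from rfl,
    pvOfList_items _ hnd]
  exact h1

-- ===== VERDICT (by name: the statement is the Claim_ definition above) =====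
theorem build_ranking_lookup_spec : Claim_equal_build_ranking_lookup :=
  fun rankings _ => pvFinal rankings
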